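-- pv_equiv track=rewrite | github.com/AndreaNicoleScarpitta/Synth | agents/critique_agent.py | _categorize_ages
-- ===== SOURCE A (Python) =====
-- from typing import Dict, Any, List, Optional
--
-- def _categorize_ages(ages: List[int]) -> Dict[str, int]:
--     """Categorize ages into groups"""
--     if not ages:
--         return {}
--
--     return {
--         "pediatric (<18)": sum(1 for age in ages if age < 18),
--         "young_adult (18-34)": sum(1 for age in ages if 18 <= age < 35),
--         "middle_aged (35-64)": sum(1 for age in ages if 35 <= age < 65),
--         "elderly (65+)": sum(1 for age in ages if age >= 65)
--     }
-- ===== SOURCE B (Python) =====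
-- from typing import Dict, List
--
-- def _categorize_ages(ages: List[int]) -> Dict[str, int]:
--     """Categorize ages into groups (single pass over the list)."""
--     if not ages:
--         return {}
--     p = y = m = e = 0
--     for age in ages:
--         if age < 18:
--             p += 1
--         elif age < 35:
--             y += 1
--         elif age < 65:
--             m += 1
--         else:
--             e += 1
--     return {
--         "pediatric (<18)": p,
--         "young_adult (18-34)": y,
--         "middle_aged (35-64)": m,
--         "elderly (65+)": e,
--     }
-- ===== Notes on version B (the rewrite author's own statement) =====
-- stated objective: simpler
-- what changed: Replaces four separate generator-sum passes over the list with one pass maintaining four counters via an if/elif chain.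
import Mathlib
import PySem

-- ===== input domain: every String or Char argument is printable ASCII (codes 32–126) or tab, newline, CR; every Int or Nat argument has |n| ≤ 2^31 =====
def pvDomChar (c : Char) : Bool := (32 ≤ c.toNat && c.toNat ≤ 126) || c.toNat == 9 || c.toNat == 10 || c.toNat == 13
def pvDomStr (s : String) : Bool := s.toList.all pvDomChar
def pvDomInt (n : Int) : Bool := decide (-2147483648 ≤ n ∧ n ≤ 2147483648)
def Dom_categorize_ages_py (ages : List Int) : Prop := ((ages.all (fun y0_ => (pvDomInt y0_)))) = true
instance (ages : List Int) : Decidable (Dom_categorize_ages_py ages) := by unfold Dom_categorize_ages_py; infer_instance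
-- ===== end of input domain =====

-- B replaces A's four generator-sum passes by one pass maintaining four counters; objective: simpler.


-- ===== PORT A =====
-- sum(1 for age in ages if cond) ported as a foldl that adds 1 when the condition holds
def pySumIf (ages : List Int) (cond : Int → Bool) : Int :=
  ages.foldl (fun acc age => if cond age then acc + 1 else acc) 0

def categorize_ages_py (ages : List Int) : List (String × Int) :=
  if ages = [] then []
  else
    [ ("pediatric (<18)", pySumIf ages (fun age => age < 18)),
      ("young_adult (18-34)", pySumIf ages (fun age => 18 ≤ age && age < 35)),
      ("middle_aged (35-64)", pySumIf ages (fun age => 35 ≤ age && age < 65)),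
      ("elderly (65+)", pySumIf ages (fun age => 65 ≤ age)) ]

-- ===== PORT B =====
-- one pass over ages, four counters updated by the if/elif chain
def altStep (st : Int × Int × Int × Int) (age : Int) : Int × Int × Int × Int :=
  let (p, y, m, e) := st
  if age < 18 then (p + 1, y, m, e)
  else if age < 35 then (p, y + 1, m, e)
  else if age < 65 then (p, y, m + 1, e)
  else (p, y, m, e + 1)

def categorize_ages_py_alt (ages : List Int) : List (String × Int) :=
  if ages = [] then []
  else
    let (p, y, m, e) := ages.foldl altStep (0, 0, 0, 0)
    [ ("pediatric (<18)", p),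
      ("young_adult (18-34)", y),
      ("middle_aged (35-64)", m),
      ("elderly (65+)", e) ]

-- ===== PRECONDITION & SPEC =====
def Spec_categorize_ages_py (ages : List Int) (out : List (String × Int)) : Prop := out = categorize_ages_py_alt ages
instance (ages : List Int) (out : List (String × Int)) : Decidable (Spec_categorize_ages_py ages out) := by unfold Spec_categorize_ages_py; infer_instance

-- ===== CLAIM (what is proved, stated in full; the proofs are below) =====
def Claim_equal_categorize_ages_py : Prop := ∀ (ages : List Int), Dom_categorize_ages_py ages → Spec_categorize_ages_py ages (categorize_ages_py ages)

-- ===== LEMMAS AND PROOFS =====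
-- A's per-bucket generator sum is a countP
lemma pySumIf_eq_countP (ages : List Int) (c : Int → Bool) :
    pySumIf ages c = (ages.countP c : Int) := by
  simpa [pySumIf] using PySem.List.foldl_if_add_one (l := ages) (p := c) (a := (0:Int))

-- loop invariant: B's single-pass fold adds the four bucket counts to the initial state
lemma altStep_foldl (ages : List Int) (p y m e : Int) :
    ages.foldl altStep (p, y, m, e) =
      (p + (ages.countP (fun age => age < 18) : Int),
       y + (ages.countP (fun age => 18 ≤ age && age < 35) : Int),
       m + (ages.countP (fun age => 35 ≤ age && age < 65) : Int),
       e + (ages.countP (fun age => 65 ≤ age) : Int)) := by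
  induction ages generalizing p y m e with
  | nil => simp
  | cons a t ih =>
    simp only [List.foldl_cons, altStep]
    split_ifs with h1 h2 h3 <;> simp only [ih, List.countP_cons] <;> clear ih <;>
      refine Prod.ext ?_ (Prod.ext ?_ (Prod.ext ?_ ?_)) <;> dsimp only <;>
      split_ifs with h <;>
      simp only [decide_eq_true_eq, Bool.and_eq_true] at h <;> push_cast <;> omega

-- ===== VERDICT (by name: the statement is the Claim_ definition above) =====
theorem categorize_ages_py_spec : Claim_equal_categorize_ages_py := by
  intro ages _
  unfold Spec_categorize_ages_py categorize_ages_py categorize_ages_py_alt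
  by_cases h : ages = []
  · simp [h]
  · simp [h, altStep_foldl, pySumIf_eq_countP]
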